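-- pv_equiv track=rewrite | github.com/eliottcassidy2000/math | 04-computation/hook_schur_transfer_connection.py | compute_M_entry
-- ===== SOURCE A (Python) =====
-- from itertools import permutations
--
-- def compute_M_entry(T, n, a, b):
--     if a == b:
--         val = 0
--         for perm in permutations(range(n)):
--             prod = 1
--             for k in range(n - 1):
--                 prod *= T.get((perm[k], perm[k + 1]), 0)
--             if prod != 0:
--                 pos = list(perm).index(a)
--                 val += (-1) ** pos * prod
--         return val
--     else:
--         U = [v for v in range(n) if v != a and v != b]
--         val = 0
--         for mask in range(1 << len(U)):
--             S = [U[k] for k in range(len(U)) if mask & (1 << k)]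
--             R = [U[k] for k in range(len(U)) if not (mask & (1 << k))]
--             sign = (-1) ** len(S)
--             S_set = set(S) | {a}
--             R_set = set(R) | {b}
--             ea = 0
--             for p in permutations(sorted(S_set)):
--                 if p[-1] != a: continue
--                 prod = 1
--                 for k in range(len(p) - 1):
--                     prod *= T.get((p[k], p[k + 1]), 0)
--                 ea += prod
--             if len(S_set) == 1: ea = 1
--             bb2 = 0
--             for p in permutations(sorted(R_set)):
--                 if p[0] != b: continue
--                 prod = 1
--                 for k in range(len(p) - 1):
--                     prod *= T.get((p[k], p[k + 1]), 0)
--                 bb2 += prod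
--             if len(R_set) == 1: bb2 = 1
--             val += sign * ea * bb2
--         return val
-- ===== SOURCE B (Python) =====
-- def compute_M_entry(T, n, a, b):
--     if a == b:
--         def go(prev, rest, idx):
--             # sum over orderings of rest of the edge-chain product from prev,
--             # weighting the step that places a by (-1)**position; prunes zero edges
--             if not rest:
--                 return 1
--             tot = 0
--             for i, v in enumerate(rest):
--                 w = 1 if prev is None else T.get((prev, v), 0)
--                 if w == 0:
--                     continue
--                 sub = w * go(v, rest[:i] + rest[i+1:], idx + 1)
--                 if v == a:
--                     sub *= (-1) ** idx
--                 tot += sub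
--             return tot
--         return go(None, list(range(n)), 0)
--     else:
--         def path_last(prev, rest):
--             # sum over orderings of rest of the chain product from prev,
--             # keeping only paths that end at a; prunes zero edges
--             if not rest:
--                 return 1 if prev == a else 0
--             tot = 0
--             for i, v in enumerate(rest):
--                 w = 1 if prev is None else T.get((prev, v), 0)
--                 if w == 0:
--                     continue
--                 tot += w * path_last(v, rest[:i] + rest[i+1:])
--             return tot
--         def path_first(prev, rest):
--             # sum over orderings of rest of the chain product from prev,
--             # forcing the first chosen element to be b; prunes zero edges
--             if not rest:
--                 return 1
--             tot = 0
--             for i, v in enumerate(rest):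
--                 if prev is None:
--                     if v != b:
--                         continue
--                     w = 1
--                 else:
--                     w = T.get((prev, v), 0)
--                     if w == 0:
--                         continue
--                 tot += w * path_first(v, rest[:i] + rest[i+1:])
--             return tot
--         U = [v for v in range(n) if v != a and v != b]
--         val = 0
--         for mask in range(1 << len(U)):
--             S = [U[k] for k in range(len(U)) if mask & (1 << k)]
--             R = [U[k] for k in range(len(U)) if not (mask & (1 << k))]
--             val += (-1) ** len(S) * path_last(None, sorted(S + [a])) * path_first(None, sorted(R + [b]))
--         return val
-- ===== Notes on version B (the rewrite author's own statement) =====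
-- stated objective: alternative
-- what changed: Replaces A's itertools.permutations enumeration (full product recomputed per permutation, sign via list.index, sets+sorted per mask) by recursive depth-first extension of partial paths that carries the running edge product, applies the (-1)^position sign at the step that places a, and prunes any branch whose next edge weight is 0.
-- outside the precondition, e.g. on compute_M_entry({}, 2, 5, 5): A returns 0, B returns 0; on compute_M_entry({(0, 1): 3, (1, 0): 2}, 2, 5, 5): A raises ValueError, B returns 5
import Mathlib
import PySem

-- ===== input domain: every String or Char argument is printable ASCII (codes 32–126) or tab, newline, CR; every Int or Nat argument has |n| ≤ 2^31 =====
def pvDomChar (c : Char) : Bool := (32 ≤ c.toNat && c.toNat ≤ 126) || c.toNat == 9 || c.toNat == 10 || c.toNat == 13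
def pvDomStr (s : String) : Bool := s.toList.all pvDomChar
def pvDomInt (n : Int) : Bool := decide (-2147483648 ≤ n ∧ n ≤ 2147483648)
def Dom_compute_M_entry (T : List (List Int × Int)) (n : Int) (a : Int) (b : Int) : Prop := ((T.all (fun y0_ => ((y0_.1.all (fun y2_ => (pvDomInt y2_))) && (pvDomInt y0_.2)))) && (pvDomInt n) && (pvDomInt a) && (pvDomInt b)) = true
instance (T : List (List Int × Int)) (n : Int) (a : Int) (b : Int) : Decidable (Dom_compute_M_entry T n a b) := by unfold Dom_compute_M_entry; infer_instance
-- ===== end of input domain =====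

-- B replaces the itertools.permutations enumeration by a recursive depth-first extension of
-- partial paths that carries the running edge product and prunes zero-weight edges
-- (objective: alternative; exact same return value).

-- ===== PORT A =====
-- literal transliteration of A (itertools.permutations enumeration + bitmask subsets)
def compute_M_entry (T : List (List Int × Int)) (n : Int) (a : Int) (b : Int) : Int :=
  if a = b then
    let xs := PySem.List.pyRange 0 n 1
    (PySem.List.permutations xs xs.length).foldl (fun val perm =>
      let prod := (PySem.List.pyRange 0 (n - 1) 1).foldl (fun pr k =>
        pr * (PySem.Dict.mk T).getD [PySem.List.pyGetD perm k 0, PySem.List.pyGetD perm (k + 1) 0] 0) 1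
      if prod ≠ 0 then
        match PySem.List.index? perm a with
        | some pos => val + (-1 : Int) ^ pos * prod
        | none => val          -- Python raises ValueError here; excluded by Pre_
      else val) 0
  else
    let U := (PySem.List.pyRange 0 n 1).filter (fun v => v != a && v != b)
    (PySem.List.pyRange 0 ((1 : Int) <<< U.length) 1).foldl (fun val mask =>
      let S := ((PySem.List.pyRange 0 (U.length : Int) 1).filter
        (fun k => PySem.Int.band mask ((1 : Int) <<< k.toNat) != 0)).map (fun k => PySem.List.pyGetD U k 0)
      let R := ((PySem.List.pyRange 0 (U.length : Int) 1).filter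
        (fun k => !(PySem.Int.band mask ((1 : Int) <<< k.toNat) != 0))).map (fun k => PySem.List.pyGetD U k 0)
      let sign := (-1 : Int) ^ S.length
      let Sset := PySem.Set.union (PySem.Set.ofList S) [a]
      let Rset := PySem.Set.union (PySem.Set.ofList R) [b]
      let Ls := PySem.List.sorted Sset (fun x => x) false
      let ea0 := (PySem.List.permutations Ls Ls.length).foldl (fun ea p =>
        if PySem.List.pyGetD p (-1) 0 ≠ a then ea
        else ea + (PySem.List.pyRange 0 (PySem.List.len p - 1) 1).foldl (fun pr k =>
          pr * (PySem.Dict.mk T).getD [PySem.List.pyGetD p k 0, PySem.List.pyGetD p (k + 1) 0] 0) 1) 0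
      let ea := if PySem.Set.len Sset = 1 then 1 else ea0
      let Lr := PySem.List.sorted Rset (fun x => x) false
      let bb0 := (PySem.List.permutations Lr Lr.length).foldl (fun bb p =>
        if PySem.List.pyGetD p 0 0 ≠ b then bb
        else bb + (PySem.List.pyRange 0 (PySem.List.len p - 1) 1).foldl (fun pr k =>
          pr * (PySem.Dict.mk T).getD [PySem.List.pyGetD p k 0, PySem.List.pyGetD p (k + 1) 0] 0) 1) 0
      let bb2 := if PySem.Set.len Rset = 1 then 1 else bb0
      val + sign * ea * bb2) 0

-- ===== PORT B =====
-- B-side helpers: edge weight, rest[:i] + rest[i+1:], and the three pruned DFS path sums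
def pvEdge (T : List (List Int × Int)) (prev : Option Int) (v : Int) : Int :=
  match prev with
  | none => 1
  | some u => (PySem.Dict.mk T).getD [u, v] 0

def pvEraseAt (rest : List Int) (i : Int) : List Int :=
  PySem.List.slice rest none (some i) ++ PySem.List.slice rest (some (i + 1)) none

-- fuel = rest.length at every call site; it only guards termination
def pvGo (T : List (List Int × Int)) (a : Int) : Nat → Option Int → List Int → Nat → Int
  | 0, _, rest, _ => if rest.isEmpty then 1 else 0
  | fuel + 1, prev, rest, idx =>
    if rest.isEmpty then 1
    else (PySem.List.enumerate rest).foldl (fun tot iv =>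
      let w := pvEdge T prev iv.2
      if w = 0 then tot
      else
        let sub := w * pvGo T a fuel (some iv.2) (pvEraseAt rest iv.1) (idx + 1)
        tot + (if iv.2 = a then sub * (-1 : Int) ^ idx else sub)) 0

def pvPathLast (T : List (List Int × Int)) (a : Int) : Nat → Option Int → List Int → Int
  | 0, prev, rest => if rest.isEmpty then (if prev = some a then 1 else 0) else 0
  | fuel + 1, prev, rest =>
    if rest.isEmpty then (if prev = some a then 1 else 0)
    else (PySem.List.enumerate rest).foldl (fun tot iv =>
      let w := pvEdge T prev iv.2
      if w = 0 then tot
      else tot + w * pvPathLast T a fuel (some iv.2) (pvEraseAt rest iv.1)) 0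

def pvPathFirst (T : List (List Int × Int)) (b : Int) : Nat → Option Int → List Int → Int
  | 0, _, rest => if rest.isEmpty then 1 else 0
  | fuel + 1, prev, rest =>
    if rest.isEmpty then 1
    else (PySem.List.enumerate rest).foldl (fun tot iv =>
      match prev with
      | none =>
        if iv.2 ≠ b then tot
        else tot + 1 * pvPathFirst T b fuel (some iv.2) (pvEraseAt rest iv.1)
      | some u =>
        let w := (PySem.Dict.mk T).getD [u, iv.2] 0
        if w = 0 then tot
        else tot + w * pvPathFirst T b fuel (some iv.2) (pvEraseAt rest iv.1)) 0

def compute_M_entry_alt (T : List (List Int × Int)) (n : Int) (a : Int) (b : Int) : Int :=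
  if a = b then
    let xs := PySem.List.pyRange 0 n 1
    pvGo T a xs.length none xs 0
  else
    let U := (PySem.List.pyRange 0 n 1).filter (fun v => v != a && v != b)
    (PySem.List.pyRange 0 ((1 : Int) <<< U.length) 1).foldl (fun val mask =>
      let S := ((PySem.List.pyRange 0 (U.length : Int) 1).filter
        (fun k => PySem.Int.band mask ((1 : Int) <<< k.toNat) != 0)).map (fun k => PySem.List.pyGetD U k 0)
      let R := ((PySem.List.pyRange 0 (U.length : Int) 1).filter
        (fun k => !(PySem.Int.band mask ((1 : Int) <<< k.toNat) != 0))).map (fun k => PySem.List.pyGetD U k 0)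
      let Ls := PySem.List.sorted (S ++ [a]) (fun x => x) false
      let Lr := PySem.List.sorted (R ++ [b]) (fun x => x) false
      val + (-1 : Int) ^ S.length * pvPathLast T a Ls.length none Ls
        * pvPathFirst T b Lr.length none Lr) 0

-- ===== PRECONDITION & SPEC =====
-- Pre_ excludes only a = b with a outside range(n): there A raises ValueError from
-- list(perm).index(a) whenever some permutation has a nonzero edge product (always when n ≤ 0),
-- and returns only in the degenerate all-products-zero case.
def Pre_compute_M_entry (T : List (List Int × Int)) (n : Int) (a : Int) (b : Int) : Prop :=
  a = b → (0 ≤ a ∧ a < n)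
instance (T : List (List Int × Int)) (n : Int) (a : Int) (b : Int) : Decidable (Pre_compute_M_entry T n a b) := by unfold Pre_compute_M_entry; infer_instance

def pvWitness_compute_M_entry : (List (List Int × Int)) × Int × Int × Int :=
  ([([0, 1], 2), ([1, 0], 3)], 2, 0, 0)

def Spec_compute_M_entry (T : List (List Int × Int)) (n : Int) (a : Int) (b : Int) (out : Int) : Prop := out = compute_M_entry_alt T n a b
instance (T : List (List Int × Int)) (n : Int) (a : Int) (b : Int) (out : Int) : Decidable (Spec_compute_M_entry T n a b out) := by unfold Spec_compute_M_entry; infer_instance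

-- ===== CLAIM (what is proved, stated in full; the proofs are below) =====
def Claim_equal_compute_M_entry : Prop := ∀ (T : List (List Int × Int)) (n : Int) (a : Int) (b : Int), Dom_compute_M_entry T n a b → Pre_compute_M_entry T n a b → Spec_compute_M_entry T n a b (compute_M_entry T n a b)

-- ===== LEMMAS AND PROOFS =====

-- proof-side chain weights: plain chain product, signed chain, last-at-a chain, first-at-b chain
def pvChainC (T : List (List Int × Int)) (prev : Option Int) : List Int → Int
  | [] => 1
  | v :: p => pvEdge T prev v * pvChainC T (some v) p

def pvChainW (T : List (List Int × Int)) (a : Int) (prev : Option Int) (idx : Nat) : List Int → Int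
  | [] => 1
  | v :: p => pvEdge T prev v * (if v = a then (-1 : Int) ^ idx else 1) * pvChainW T a (some v) (idx + 1) p

def pvChainL (T : List (List Int × Int)) (a : Int) (prev : Option Int) : List Int → Int
  | [] => if prev = some a then 1 else 0
  | v :: p => pvEdge T prev v * pvChainL T a (some v) p

def pvChainF (T : List (List Int × Int)) (b : Int) (prev : Option Int) : List Int → Int
  | [] => 1
  | v :: p => (match prev with
      | none => if v = b then 1 else 0
      | some u => pvEdge T (some u) v) * pvChainF T b (some v) p

lemma pvPerm_unfold (xs : List Int) (r : Nat) :
    PySem.List.permutations xs (r + 1) =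
      (List.range xs.length).flatMap (fun i => match xs[i]? with
        | none => []
        | some v => (PySem.List.permutations (xs.eraseIdx i) r).map (fun p => v :: p)) := by
  rw [PySem.List.permutations]
  apply List.flatMap_congr
  intro i _
  cases xs[i]? <;> rfl

lemma pvEraseAt_natCast (l : List Int) (j : Nat) : pvEraseAt l (j : Int) = l.eraseIdx j := by
  have h1 : ((j : Int) + 1) = ((j + 1 : Nat) : Int) := by push_cast; ring
  rw [pvEraseAt, h1, PySem.List.slice_to_natCast, PySem.List.slice_from_natCast,
    List.eraseIdx_eq_take_drop_succ]

lemma pvFoldRange (T : List (List Int × Int)) :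
    ∀ (q : List Int) (v : Int) (c : Int),
    (List.range q.length).foldl (fun (pr : Int) (j : Nat) =>
        pr * (PySem.Dict.mk T).getD [PySem.List.pyGetD (v :: q) (j : Int) 0,
          PySem.List.pyGetD (v :: q) ((j : Int) + 1) 0] 0) c
      = c * pvChainC T (some v) q := by
  intro q
  induction q with
  | nil => intro v c; simp [pvChainC]
  | cons w q' ih =>
    intro v c
    simp only [List.length_cons]
    rw [List.range_succ_eq_map, List.foldl_cons, List.foldl_map]
    have hbody : ∀ (pr : Int) (j : Nat),
        pr * (PySem.Dict.mk T).getD [PySem.List.pyGetD (v :: w :: q') ((j.succ : Nat) : Int) 0,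
          PySem.List.pyGetD (v :: w :: q') (((j.succ : Nat) : Int) + 1) 0] 0
        = pr * (PySem.Dict.mk T).getD [PySem.List.pyGetD (w :: q') ((j : Nat) : Int) 0,
          PySem.List.pyGetD (w :: q') (((j : Nat) : Int) + 1) 0] 0 := by
      intro pr j
      have e1 : PySem.List.pyGetD (v :: w :: q') ((j.succ : Nat) : Int) 0
          = PySem.List.pyGetD (w :: q') ((j : Nat) : Int) 0 := by
        have h4 : ((j.succ : Nat) : Int) = (((j + 1) : Nat) : Int) := by push_cast; ring
        rw [h4, PySem.List.pyGetD_natCast, PySem.List.pyGetD_natCast]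
        rfl
      have e2 : PySem.List.pyGetD (v :: w :: q') (((j.succ : Nat) : Int) + 1) 0
          = PySem.List.pyGetD (w :: q') (((j : Nat) : Int) + 1) 0 := by
        have h4 : ((j.succ : Nat) : Int) + 1 = (((j + 2) : Nat) : Int) := by push_cast; ring
        have e3 : ((j : Nat) : Int) + 1 = (((j + 1) : Nat) : Int) := by push_cast; ring
        rw [h4, e3, PySem.List.pyGetD_natCast, PySem.List.pyGetD_natCast]
        rfl
      rw [e1, e2]
    rw [PySem.List.foldl_congr_mem _ _ _ _ ?hc]
    case hc => intro pr j _; exact hbody pr j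
    have i0 : PySem.List.pyGetD (v :: w :: q') ((0:Nat) : Int) 0 = v := by
      rw [PySem.List.pyGetD_natCast]; rfl
    have i1 : PySem.List.pyGetD (v :: w :: q') (((0:Nat) : Int) + 1) 0 = w := by
      have : (((0:Nat)) : Int) + 1 = (((1:Nat)) : Int) := by norm_num
      rw [this, PySem.List.pyGetD_natCast]; rfl
    rw [i0, i1, ih w _]
    simp only [pvChainC, pvEdge]
    exact mul_assoc _ _ _

lemma pvProdLoop (T : List (List Int × Int)) (p : List Int) (m : Int) (hp : p ≠ [])
    (hm : m.toNat + 1 = p.length) :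
    (PySem.List.pyRange 0 m 1).foldl (fun pr k =>
        pr * (PySem.Dict.mk T).getD [PySem.List.pyGetD p k 0, PySem.List.pyGetD p (k + 1) 0] 0) 1
      = pvChainC T none p := by
  obtain ⟨v, q, rfl⟩ : ∃ v q, p = v :: q := by
    cases p with
    | nil => exact absurd rfl hp
    | cons v q => exact ⟨v, q, rfl⟩
  have hq : q.length = m.toNat := by
    simp only [List.length_cons] at hm; omega
  by_cases hm0 : 0 ≤ m
  · rw [show m = ((m.toNat : Nat) : Int) from (Int.toNat_of_nonneg hm0).symm,
      PySem.List.pyRange_zero_natCast, List.foldl_map, ← hq]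
    have := pvFoldRange T q v 1
    rw [this]
    simp only [pvChainC, pvEdge, one_mul]
  · have : m < 0 := by omega
    have hq0 : q = [] := by
      have : m.toNat = 0 := by omega
      rw [List.eq_nil_iff_length_eq_zero]; omega
    subst hq0
    rw [PySem.List.pyRange_one_eq_nil (by omega)]
    simp [pvChainC, pvEdge]

lemma pvChainW_of_not_mem (T : List (List Int × Int)) (a : Int) :
    ∀ (p : List Int) (prev : Option Int) (idx : Nat), a ∉ p →
    pvChainW T a prev idx p = pvChainC T prev p := by
  intro p
  induction p with
  | nil => intro prev idx _; rfl
  | cons v q ih =>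
    intro prev idx h
    simp only [List.mem_cons, not_or] at h
    simp only [pvChainW, pvChainC, if_neg (Ne.symm h.1), mul_one, ih _ _ h.2]

lemma pvChainW_eq (T : List (List Int × Int)) (a : Int) :
    ∀ (p : List Int) (prev : Option Int) (idx : Nat) (pos : Nat), p.Nodup →
    PySem.List.index? p a = some pos →
    pvChainW T a prev idx p = (-1 : Int) ^ (idx + pos) * pvChainC T prev p := by
  intro p
  induction p with
  | nil => intro prev idx pos _ h; simp [PySem.List.index?] at h
  | cons v q ih =>
    intro prev idx pos hnd h
    by_cases hv : v = a
    · subst hv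
      rw [PySem.List.index?_cons_self] at h
      obtain rfl : pos = 0 := (Option.some_inj.mp h).symm
      have hnotin : v ∉ q := (List.nodup_cons.mp hnd).1
      simp only [pvChainW, pvChainC, if_true, pvChainW_of_not_mem T v q _ _ hnotin]
      ring
    · rw [PySem.List.index?_cons_of_ne q hv] at h
      cases hq : PySem.List.index? q a with
      | none => rw [hq] at h; simp at h
      | some pos' =>
        rw [hq] at h
        simp only [Option.map_some] at h
        obtain rfl : pos = pos' + 1 := (Option.some_inj.mp h).symm
        simp only [pvChainW, pvChainC, if_neg hv, mul_one,
          ih (some v) (idx + 1) pos' (List.nodup_cons.mp hnd).2 hq]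
        have harith : idx + 1 + pos' = idx + (pos' + 1) := by omega
        rw [harith]
        ring

lemma pvChainL_eq (T : List (List Int × Int)) (a : Int) :
    ∀ (p : List Int) (prev : Option Int) (h : p ≠ []),
    pvChainL T a prev p = if p.getLast h = a then pvChainC T prev p else 0 := by
  intro p
  induction p with
  | nil => intro _ h; exact absurd rfl h
  | cons v q ih =>
    intro prev h
    cases q with
    | nil =>
      simp only [pvChainL, pvChainC, List.getLast_singleton]
      by_cases hv : v = a <;> simp [hv]
    | cons w q' =>
      have hq : (w :: q') ≠ [] := by simp
      rw [List.getLast_cons hq]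
      show pvEdge T prev v * pvChainL T a (some v) (w :: q') = _
      rw [ih (some v) hq]
      split_ifs with hlast
      · show _ = pvEdge T prev v * pvChainC T (some v) (w :: q')
        rfl
      · exact mul_zero _

lemma pvChainF_some (T : List (List Int × Int)) (b : Int) :
    ∀ (p : List Int) (u : Int), pvChainF T b (some u) p = pvChainC T (some u) p := by
  intro p
  induction p with
  | nil => intro u; rfl
  | cons v q ih => intro u; simp only [pvChainF, pvChainC, pvEdge, ih]

lemma pvSum_flatMap {α : Type} (l : List α) (f : α → List Int) :
    (l.flatMap f).sum = (l.map (fun i => (f i).sum)).sum := by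
  rw [List.flatMap, List.sum_flatten, List.map_map]; rfl

lemma pvGoSum (T : List (List Int × Int)) (a : Int) :
    ∀ (fuel : Nat) (rest : List Int) (prev : Option Int) (idx : Nat),
    rest.length ≤ fuel → rest.Nodup →
    pvGo T a fuel prev rest idx
      = ((PySem.List.permutations rest rest.length).map (pvChainW T a prev idx)).sum := by
  intro fuel
  induction fuel with
  | zero =>
    intro rest prev idx hle _
    obtain rfl : rest = [] := List.eq_nil_of_length_eq_zero (Nat.le_zero.mp hle)
    simp [pvGo, pvChainW]
  | succ fuel ih =>
    intro rest prev idx hle hnd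
    cases rest with
    | nil => simp [pvGo, pvChainW]
    | cons v rs =>
      have hlen : (v :: rs).length = rs.length + 1 := rfl
      -- LHS → sum over List.range
      rw [show pvGo T a (fuel + 1) prev (v :: rs) idx
          = (PySem.List.enumerate (v :: rs)).foldl (fun tot iv =>
              let w := pvEdge T prev iv.2
              if w = 0 then tot
              else
                let sub := w * pvGo T a fuel (some iv.2) (pvEraseAt (v :: rs) iv.1) (idx + 1)
                tot + (if iv.2 = a then sub * (-1 : Int) ^ idx else sub)) 0 from rfl]
      rw [PySem.List.enumerate_eq_map_pyRange (v :: rs) 0, PySem.List.len_eq,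
        PySem.List.pyRange_zero_natCast, List.map_map, List.foldl_map]
      simp only [Function.comp_def]
      set L := v :: rs with hL
      have hbody : ∀ (tot : Int), ∀ j ∈ List.range L.length,
          (fun (tot : Int) (j : Nat) =>
            let w := pvEdge T prev (PySem.List.pyGetD L (j : Int) 0)
            if w = 0 then tot
            else
              let sub := w * pvGo T a fuel (some (PySem.List.pyGetD L (j : Int) 0))
                (pvEraseAt L (j : Int)) (idx + 1)
              tot + (if (PySem.List.pyGetD L (j : Int) 0) = a then sub * (-1 : Int) ^ idx else sub)) tot j
          = tot + (fun (j : Nat) =>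
              let w := pvEdge T prev (PySem.List.pyGetD L (j : Int) 0)
              if w = 0 then 0
              else
                let sub := w * pvGo T a fuel (some (PySem.List.pyGetD L (j : Int) 0))
                  (pvEraseAt L (j : Int)) (idx + 1)
                (if (PySem.List.pyGetD L (j : Int) 0) = a then sub * (-1 : Int) ^ idx else sub)) j := by
        intro tot j _
        simp only
        split_ifs <;> simp
      rw [PySem.List.foldl_congr_mem _ _ _ _ hbody, PySem.List.foldl_add, zero_add]
      -- RHS → sum over List.range
      rw [show (v :: rs).length = rs.length + 1 from rfl, pvPerm_unfold, List.map_flatMap,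
        ← hlen]
      rw [show (fun i => List.map (pvChainW T a prev idx) (match L[i]? with
            | none => []
            | some w => (PySem.List.permutations (L.eraseIdx i) rs.length).map (fun p => w :: p)))
          = (fun i => match L[i]? with
            | none => []
            | some w => ((PySem.List.permutations (L.eraseIdx i) rs.length).map (fun p => w :: p)).map
                (pvChainW T a prev idx)) from by
        funext i; cases L[i]? <;> rfl]
      rw [pvSum_flatMap]
      congr 1
      apply List.map_congr_left
      intro j hj
      have hjlt : j < L.length := List.mem_range.mp hj
      have hgetd : PySem.List.pyGetD L (j : Int) 0 = L[j] := by
        rw [PySem.List.pyGetD_natCast, List.getD_eq_getElem _ _ hjlt]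
      have hget? : L[j]? = some L[j] := List.getElem?_eq_getElem hjlt
      have herase : pvEraseAt L (j : Int) = L.eraseIdx j := pvEraseAt_natCast L j
      have hlen' : (L.eraseIdx j).length = rs.length := by
        rw [List.length_eraseIdx, if_pos hjlt, hlen]; omega
      have hih : pvGo T a fuel (some L[j]) (L.eraseIdx j) (idx + 1)
          = ((PySem.List.permutations (L.eraseIdx j) rs.length).map
              (pvChainW T a (some L[j]) (idx + 1))).sum := by
        rw [← hlen']
        exact ih (L.eraseIdx j) (some L[j]) (idx + 1)
          (by omega)
          (hnd.sublist (List.eraseIdx_sublist L j))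
      simp only [hgetd, hget?, herase, List.map_map]
      have hcw : ∀ p : List Int, pvChainW T a prev idx (L[j] :: p)
          = (pvEdge T prev L[j] * (if L[j] = a then (-1 : Int) ^ idx else 1))
            * pvChainW T a (some L[j]) (idx + 1) p := fun p => rfl
      rw [show ((pvChainW T a prev idx) ∘ (fun p => L[j] :: p))
          = fun p => (pvEdge T prev L[j] * (if L[j] = a then (-1 : Int) ^ idx else 1))
            * pvChainW T a (some L[j]) (idx + 1) p from by funext p; exact hcw p]
      rw [PySem.List.sum_map_const_mul_int, ← hih]
      by_cases hw : pvEdge T prev L[j] = 0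
      · simp [hw]
      · simp only [if_neg hw]
        split_ifs with ha <;> ring

lemma pvPathLastSum (T : List (List Int × Int)) (a : Int) :
    ∀ (fuel : Nat) (rest : List Int) (prev : Option Int),
    rest.length ≤ fuel →
    pvPathLast T a fuel prev rest
      = ((PySem.List.permutations rest rest.length).map (pvChainL T a prev)).sum := by
  intro fuel
  induction fuel with
  | zero =>
    intro rest prev hle
    obtain rfl : rest = [] := List.eq_nil_of_length_eq_zero (Nat.le_zero.mp hle)
    simp [pvPathLast, pvChainL]
  | succ fuel ih =>
    intro rest prev hle
    cases rest with
    | nil => simp [pvPathLast, pvChainL]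
    | cons v rs =>
      rw [show pvPathLast T a (fuel + 1) prev (v :: rs)
          = (PySem.List.enumerate (v :: rs)).foldl (fun tot iv =>
              let w := pvEdge T prev iv.2
              if w = 0 then tot
              else tot + w * pvPathLast T a fuel (some iv.2) (pvEraseAt (v :: rs) iv.1)) 0 from rfl]
      rw [PySem.List.enumerate_eq_map_pyRange (v :: rs) 0, PySem.List.len_eq,
        PySem.List.pyRange_zero_natCast, List.map_map, List.foldl_map]
      simp only [Function.comp_def]
      set L := v :: rs with hL
      have hlen : L.length = rs.length + 1 := rfl
      have hbody : ∀ (tot : Int), ∀ j ∈ List.range L.length,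
          (fun (tot : Int) (j : Nat) =>
            let w := pvEdge T prev (PySem.List.pyGetD L (j : Int) 0)
            if w = 0 then tot
            else tot + w * pvPathLast T a fuel (some (PySem.List.pyGetD L (j : Int) 0))
              (pvEraseAt L (j : Int))) tot j
          = tot + (fun (j : Nat) =>
              let w := pvEdge T prev (PySem.List.pyGetD L (j : Int) 0)
              if w = 0 then 0
              else w * pvPathLast T a fuel (some (PySem.List.pyGetD L (j : Int) 0))
                (pvEraseAt L (j : Int))) j := by
        intro tot j _
        simp only
        split_ifs <;> simp
      rw [PySem.List.foldl_congr_mem _ _ _ _ hbody, PySem.List.foldl_add, zero_add]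
      rw [show (v :: rs).length = rs.length + 1 from rfl, pvPerm_unfold, List.map_flatMap,
        ← hlen]
      rw [show (fun i => List.map (pvChainL T a prev) (match L[i]? with
            | none => []
            | some w => (PySem.List.permutations (L.eraseIdx i) rs.length).map (fun p => w :: p)))
          = (fun i => match L[i]? with
            | none => []
            | some w => ((PySem.List.permutations (L.eraseIdx i) rs.length).map (fun p => w :: p)).map
                (pvChainL T a prev)) from by
        funext i; cases L[i]? <;> rfl]
      rw [pvSum_flatMap]
      congr 1
      apply List.map_congr_left
      intro j hj
      have hjlt : j < L.length := List.mem_range.mp hj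
      have hgetd : PySem.List.pyGetD L (j : Int) 0 = L[j] := by
        rw [PySem.List.pyGetD_natCast, List.getD_eq_getElem _ _ hjlt]
      have hget? : L[j]? = some L[j] := List.getElem?_eq_getElem hjlt
      have herase : pvEraseAt L (j : Int) = L.eraseIdx j := pvEraseAt_natCast L j
      have hlen' : (L.eraseIdx j).length = rs.length := by
        rw [List.length_eraseIdx, if_pos hjlt, hlen]; omega
      have hih : pvPathLast T a fuel (some L[j]) (L.eraseIdx j)
          = ((PySem.List.permutations (L.eraseIdx j) rs.length).map
              (pvChainL T a (some L[j]))).sum := by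
        rw [← hlen']
        exact ih (L.eraseIdx j) (some L[j]) (by omega)
      simp only [hgetd, hget?, herase, List.map_map]
      rw [show ((pvChainL T a prev) ∘ (fun p => L[j] :: p))
          = fun p => pvEdge T prev L[j] * pvChainL T a (some L[j]) p from by
        funext p; rfl]
      rw [PySem.List.sum_map_const_mul_int, ← hih]
      by_cases hw : pvEdge T prev L[j] = 0
      · simp [hw]
      · simp only [if_neg hw]

lemma pvPathFirstSum (T : List (List Int × Int)) (b : Int) :
    ∀ (fuel : Nat) (rest : List Int) (prev : Option Int),
    rest.length ≤ fuel →
    pvPathFirst T b fuel prev rest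
      = ((PySem.List.permutations rest rest.length).map (pvChainF T b prev)).sum := by
  intro fuel
  induction fuel with
  | zero =>
    intro rest prev hle
    obtain rfl : rest = [] := List.eq_nil_of_length_eq_zero (Nat.le_zero.mp hle)
    simp [pvPathFirst, pvChainF]
  | succ fuel ih =>
    intro rest prev hle
    cases rest with
    | nil => simp [pvPathFirst, pvChainF]
    | cons v rs =>
      rw [show pvPathFirst T b (fuel + 1) prev (v :: rs)
          = (PySem.List.enumerate (v :: rs)).foldl (fun tot iv =>
              match prev with
              | none =>
                if iv.2 ≠ b then tot
                else tot + 1 * pvPathFirst T b fuel (some iv.2) (pvEraseAt (v :: rs) iv.1)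
              | some u =>
                let w := (PySem.Dict.mk T).getD [u, iv.2] 0
                if w = 0 then tot
                else tot + w * pvPathFirst T b fuel (some iv.2) (pvEraseAt (v :: rs) iv.1)) 0 from rfl]
      rw [PySem.List.enumerate_eq_map_pyRange (v :: rs) 0, PySem.List.len_eq,
        PySem.List.pyRange_zero_natCast, List.map_map, List.foldl_map]
      simp only [Function.comp_def]
      set L := v :: rs with hL
      have hlen : L.length = rs.length + 1 := rfl
      have hbody : ∀ (tot : Int), ∀ j ∈ List.range L.length,
          (fun (tot : Int) (j : Nat) =>
            match prev with
            | none =>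
              if (PySem.List.pyGetD L (j : Int) 0) ≠ b then tot
              else tot + 1 * pvPathFirst T b fuel (some (PySem.List.pyGetD L (j : Int) 0))
                (pvEraseAt L (j : Int))
            | some u =>
              let w := (PySem.Dict.mk T).getD [u, PySem.List.pyGetD L (j : Int) 0] 0
              if w = 0 then tot
              else tot + w * pvPathFirst T b fuel (some (PySem.List.pyGetD L (j : Int) 0))
                (pvEraseAt L (j : Int))) tot j
          = tot + (fun (j : Nat) =>
              (match prev with
                | none => if (PySem.List.pyGetD L (j : Int) 0) = b then 1 else 0
                | some u => (PySem.Dict.mk T).getD [u, PySem.List.pyGetD L (j : Int) 0] 0)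
              * pvPathFirst T b fuel (some (PySem.List.pyGetD L (j : Int) 0))
                (pvEraseAt L (j : Int))) j := by
        intro tot j _
        cases prev with
        | none =>
          simp only
          set x := PySem.List.pyGetD L (j : Int) 0 with hx
          by_cases hb : x = b
          · simp [hb]
          · simp [hb]
        | some u =>
          simp only
          set x := PySem.List.pyGetD L (j : Int) 0 with hx
          by_cases hw : (PySem.Dict.mk T).getD [u, x] 0 = 0
          · simp [hw]
          · simp [hw]
      rw [PySem.List.foldl_congr_mem _ _ _ _ hbody, PySem.List.foldl_add, zero_add]
      rw [show (v :: rs).length = rs.length + 1 from rfl, pvPerm_unfold, List.map_flatMap,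
        ← hlen]
      rw [show (fun i => List.map (pvChainF T b prev) (match L[i]? with
            | none => []
            | some w => (PySem.List.permutations (L.eraseIdx i) rs.length).map (fun p => w :: p)))
          = (fun i => match L[i]? with
            | none => []
            | some w => ((PySem.List.permutations (L.eraseIdx i) rs.length).map (fun p => w :: p)).map
                (pvChainF T b prev)) from by
        funext i; cases L[i]? <;> rfl]
      rw [pvSum_flatMap]
      congr 1
      apply List.map_congr_left
      intro j hj
      have hjlt : j < L.length := List.mem_range.mp hj
      have hgetd : PySem.List.pyGetD L (j : Int) 0 = L[j] := by
        rw [PySem.List.pyGetD_natCast, List.getD_eq_getElem _ _ hjlt]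
      have hget? : L[j]? = some L[j] := List.getElem?_eq_getElem hjlt
      have herase : pvEraseAt L (j : Int) = L.eraseIdx j := pvEraseAt_natCast L j
      have hlen' : (L.eraseIdx j).length = rs.length := by
        rw [List.length_eraseIdx, if_pos hjlt, hlen]; omega
      have hih : pvPathFirst T b fuel (some L[j]) (L.eraseIdx j)
          = ((PySem.List.permutations (L.eraseIdx j) rs.length).map
              (pvChainF T b (some L[j]))).sum := by
        rw [← hlen']
        exact ih (L.eraseIdx j) (some L[j]) (by omega)
      simp only [hgetd, hget?, herase, List.map_map]
      cases prev with
      | none =>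
        rw [show ((pvChainF T b none) ∘ (fun p => L[j] :: p))
            = fun p => (if L[j] = b then (1 : Int) else 0) * pvChainF T b (some L[j]) p from by
          funext p; rfl]
        rw [PySem.List.sum_map_const_mul_int, ← hih]
      | some u =>
        rw [show ((pvChainF T b (some u)) ∘ (fun p => L[j] :: p))
            = fun p => pvEdge T (some u) L[j] * pvChainF T b (some L[j]) p from by
          funext p; rfl]
        rw [PySem.List.sum_map_const_mul_int, ← hih]
        rfl

lemma pvChainF_none (T : List (List Int × Int)) (b v : Int) (q : List Int) :
    pvChainF T b none (v :: q) = if v = b then pvChainC T none (v :: q) else 0 := by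
  simp only [pvChainF, pvChainF_some, pvChainC, pvEdge]
  split_ifs <;> simp

lemma pvSel_mem (U : List Int) (pred : Int → Bool) :
    ∀ x ∈ ((PySem.List.pyRange 0 (U.length : Int) 1).filter pred).map
      (fun k => PySem.List.pyGetD U k 0), x ∈ U := by
  intro x hx
  obtain ⟨k, hk, rfl⟩ := List.mem_map.mp hx
  have hk' := List.mem_filter.mp hk
  have hb := PySem.List.mem_pyRange_one.mp hk'.1
  exact PySem.List.pyGetD_mem U 0 (by unfold PySem.Raise.InRange; omega)

lemma pvSel_nodup (U : List Int) (hU : U.Nodup) (pred : Int → Bool) :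
    (((PySem.List.pyRange 0 (U.length : Int) 1).filter pred).map
      (fun k => PySem.List.pyGetD U k 0)).Nodup := by
  rw [List.Nodup, List.pairwise_map]
  have hpair : ((PySem.List.pyRange 0 (U.length : Int) 1).filter pred).Pairwise (· < ·) :=
    (PySem.List.pairwise_lt_pyRange_one 0 (U.length : Int)).filter pred
  refine List.Pairwise.imp_of_mem ?_ hpair
  intro k k' hk hk' hlt
  have h1 := PySem.List.mem_pyRange_one.mp (List.mem_filter.mp hk).1
  have h2 := PySem.List.mem_pyRange_one.mp (List.mem_filter.mp hk').1
  have hklt : k.toNat < U.length := by omega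
  have hklt' : k'.toNat < U.length := by omega
  rw [PySem.List.pyGetD_eq_getElem U 0 h1.1 h1.2, PySem.List.pyGetD_eq_getElem U 0 h2.1 h2.2]
  intro heq
  have := (hU.getElem_inj_iff).mp heq
  omega

lemma pvSetUnion (S : List Int) (a : Int) (h : S.Nodup) (ha : a ∉ S) :
    PySem.Set.union (PySem.Set.ofList S) [a] = S ++ [a] := by
  rw [PySem.Set.union, PySem.Set.update_cons, PySem.Set.update_nil,
    PySem.Set.ofList_eq_self_of_nodup S h, PySem.Set.add_of_not_mem ha]

lemma pvPathLast_single (T : List (List Int × Int)) (a : Int) :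
    pvPathLast T a 1 none [a] = 1 := by
  simp [pvPathLast, pvEdge, pvEraseAt, PySem.List.enumerate, PySem.List.slice]

lemma pvPathFirst_single (T : List (List Int × Int)) (b : Int) :
    pvPathFirst T b 1 none [b] = 1 := by
  simp [pvPathFirst, pvEraseAt, PySem.List.enumerate, PySem.List.slice]

lemma pvEa_eq (T : List (List Int × Int)) (a : Int) (S : List Int)
    (hnd : S.Nodup) (haS : a ∉ S) :
    (if PySem.Set.len (PySem.Set.union (PySem.Set.ofList S) [a]) = 1 then 1 else
      (PySem.List.permutations (PySem.List.sorted (PySem.Set.union (PySem.Set.ofList S) [a]) (fun x => x) false)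
          (PySem.List.sorted (PySem.Set.union (PySem.Set.ofList S) [a]) (fun x => x) false).length).foldl
        (fun ea p =>
          if PySem.List.pyGetD p (-1) 0 ≠ a then ea
          else ea + (PySem.List.pyRange 0 (PySem.List.len p - 1) 1).foldl (fun pr k =>
            pr * (PySem.Dict.mk T).getD [PySem.List.pyGetD p k 0, PySem.List.pyGetD p (k + 1) 0] 0) 1) 0)
    = pvPathLast T a (PySem.List.sorted (S ++ [a]) (fun x => x) false).length none
        (PySem.List.sorted (S ++ [a]) (fun x => x) false) := by
  rw [pvSetUnion S a hnd haS]
  set L := PySem.List.sorted (S ++ [a]) (fun x => x) false with hLdef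
  have hLperm : L.Perm (S ++ [a]) := PySem.List.sorted_perm (S ++ [a]) (fun x => x) false
  have hLlen : L.length = S.length + 1 := by rw [hLperm.length_eq, List.length_append]; rfl
  have hLne : L ≠ [] := by intro h; rw [h] at hLlen; simp at hLlen
  have hfold : (PySem.List.permutations L L.length).foldl
        (fun ea p =>
          if PySem.List.pyGetD p (-1) 0 ≠ a then ea
          else ea + (PySem.List.pyRange 0 (PySem.List.len p - 1) 1).foldl (fun pr k =>
            pr * (PySem.Dict.mk T).getD [PySem.List.pyGetD p k 0, PySem.List.pyGetD p (k + 1) 0] 0) 1) 0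
      = pvPathLast T a L.length none L := by
    have hbody : ∀ (ea : Int), ∀ p ∈ PySem.List.permutations L L.length,
        (fun (ea : Int) (p : List Int) =>
          if PySem.List.pyGetD p (-1) 0 ≠ a then ea
          else ea + (PySem.List.pyRange 0 (PySem.List.len p - 1) 1).foldl (fun pr k =>
            pr * (PySem.Dict.mk T).getD [PySem.List.pyGetD p k 0, PySem.List.pyGetD p (k + 1) 0] 0) 1) ea p
        = ea + pvChainL T a none p := by
      intro ea p hmem
      have hperm := PySem.List.perm_of_mem_permutations hmem
      have hpne : p ≠ [] := by
        intro h
        rw [h] at hperm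
        have := hperm.length_eq
        simp at this
        omega
      have hlast : PySem.List.pyGetD p (-1) 0 = p.getLast hpne :=
        PySem.List.pyGetD_neg_one p 0 hpne
      have hplen : 1 ≤ p.length := by
        cases p with
        | nil => exact absurd rfl hpne
        | cons _ _ => simp
      have hprod : (PySem.List.pyRange 0 (PySem.List.len p - 1) 1).foldl (fun pr k =>
            pr * (PySem.Dict.mk T).getD [PySem.List.pyGetD p k 0,
              PySem.List.pyGetD p (k + 1) 0] 0) 1 = pvChainC T none p := by
        apply pvProdLoop T p _ hpne
        rw [PySem.List.len_eq]
        omega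
      simp only [hlast, hprod, pvChainL_eq T a p none hpne]
      by_cases hla : p.getLast hpne = a
      · rw [if_neg (not_not_intro hla), if_pos hla]
      · rw [if_pos hla, if_neg hla, add_zero]
    rw [PySem.List.foldl_congr_mem _ _ _ _ hbody, PySem.List.foldl_add, zero_add,
      pvPathLastSum T a L.length L none le_rfl]
  split_ifs with hone
  · -- S empty: L = [a]
    have hS : S = [] := by
      rw [PySem.Set.len] at hone
      have : (S ++ [a]).length = 1 := by exact_mod_cast hone
      rw [List.length_append] at this
      simpa using List.eq_nil_of_length_eq_zero (by simpa using this)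
    subst hS
    have hLa : L = [a] := by rw [hLdef]; rfl
    rw [hLa, show ([a] : List Int).length = 1 from rfl, pvPathLast_single]
  · exact hfold

lemma pvBb_eq (T : List (List Int × Int)) (b : Int) (R : List Int)
    (hnd : R.Nodup) (hbR : b ∉ R) :
    (if PySem.Set.len (PySem.Set.union (PySem.Set.ofList R) [b]) = 1 then 1 else
      (PySem.List.permutations (PySem.List.sorted (PySem.Set.union (PySem.Set.ofList R) [b]) (fun x => x) false)
          (PySem.List.sorted (PySem.Set.union (PySem.Set.ofList R) [b]) (fun x => x) false).length).foldl
        (fun bb p =>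
          if PySem.List.pyGetD p 0 0 ≠ b then bb
          else bb + (PySem.List.pyRange 0 (PySem.List.len p - 1) 1).foldl (fun pr k =>
            pr * (PySem.Dict.mk T).getD [PySem.List.pyGetD p k 0, PySem.List.pyGetD p (k + 1) 0] 0) 1) 0)
    = pvPathFirst T b (PySem.List.sorted (R ++ [b]) (fun x => x) false).length none
        (PySem.List.sorted (R ++ [b]) (fun x => x) false) := by
  rw [pvSetUnion R b hnd hbR]
  set L := PySem.List.sorted (R ++ [b]) (fun x => x) false with hLdef
  have hLperm : L.Perm (R ++ [b]) := PySem.List.sorted_perm (R ++ [b]) (fun x => x) false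
  have hLlen : L.length = R.length + 1 := by rw [hLperm.length_eq, List.length_append]; rfl
  have hLne : L ≠ [] := by intro h; rw [h] at hLlen; simp at hLlen
  have hfold : (PySem.List.permutations L L.length).foldl
        (fun bb p =>
          if PySem.List.pyGetD p 0 0 ≠ b then bb
          else bb + (PySem.List.pyRange 0 (PySem.List.len p - 1) 1).foldl (fun pr k =>
            pr * (PySem.Dict.mk T).getD [PySem.List.pyGetD p k 0, PySem.List.pyGetD p (k + 1) 0] 0) 1) 0
      = pvPathFirst T b L.length none L := by
    have hbody : ∀ (bb : Int), ∀ p ∈ PySem.List.permutations L L.length,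
        (fun (bb : Int) (p : List Int) =>
          if PySem.List.pyGetD p 0 0 ≠ b then bb
          else bb + (PySem.List.pyRange 0 (PySem.List.len p - 1) 1).foldl (fun pr k =>
            pr * (PySem.Dict.mk T).getD [PySem.List.pyGetD p k 0, PySem.List.pyGetD p (k + 1) 0] 0) 1) bb p
        = bb + pvChainF T b none p := by
      intro bb p hmem
      have hperm := PySem.List.perm_of_mem_permutations hmem
      have hpne : p ≠ [] := by
        intro h
        rw [h] at hperm
        have := hperm.length_eq
        simp at this
        omega
      obtain ⟨v, q, rfl⟩ : ∃ v q, p = v :: q := by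
        cases p with
        | nil => exact absurd rfl hpne
        | cons v q => exact ⟨v, q, rfl⟩
      have hhead : PySem.List.pyGetD (v :: q) 0 0 = v := PySem.List.pyGetD_zero_cons v q 0
      have hprod : (PySem.List.pyRange 0 (PySem.List.len (v :: q) - 1) 1).foldl (fun pr k =>
            pr * (PySem.Dict.mk T).getD [PySem.List.pyGetD (v :: q) k 0,
              PySem.List.pyGetD (v :: q) (k + 1) 0] 0) 1 = pvChainC T none (v :: q) := by
        apply pvProdLoop T (v :: q) _ hpne
        rw [PySem.List.len_eq]
        simp
      simp only [hhead, hprod, pvChainF_none T b v q]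
      by_cases hvb : v = b
      · rw [if_neg (not_not_intro hvb), if_pos hvb]
      · rw [if_pos hvb, if_neg hvb, add_zero]
    rw [PySem.List.foldl_congr_mem _ _ _ _ hbody, PySem.List.foldl_add, zero_add,
      pvPathFirstSum T b L.length L none le_rfl]
  split_ifs with hone
  · have hR : R = [] := by
      rw [PySem.Set.len] at hone
      have : (R ++ [b]).length = 1 := by exact_mod_cast hone
      rw [List.length_append] at this
      simpa using List.eq_nil_of_length_eq_zero (by simpa using this)
    subst hR
    have hLb : L = [b] := by rw [hLdef]; rfl
    rw [hLb, show ([b] : List Int).length = 1 from rfl, pvPathFirst_single]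
  · exact hfold

theorem compute_M_entry_spec : Claim_equal_compute_M_entry := by
  unfold Claim_equal_compute_M_entry
  intro T n a b _ hpre
  unfold Spec_compute_M_entry
  by_cases hab : a = b
  · -- a == b branch
    obtain ⟨ha0, han⟩ := hpre hab
    rw [compute_M_entry, compute_M_entry_alt, if_pos hab, if_pos hab]
    have hxsnd : (PySem.List.pyRange 0 n 1).Nodup := PySem.List.nodup_pyRange_one 0 n
    have hxslen : (PySem.List.pyRange 0 n 1).length = n.toNat := by
      rw [PySem.List.length_pyRange_one]; omega
    have hbody : ∀ (val : Int), ∀ perm ∈ PySem.List.permutations (PySem.List.pyRange 0 n 1)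
        (PySem.List.pyRange 0 n 1).length,
        (fun (val : Int) (perm : List Int) =>
          let prod := (PySem.List.pyRange 0 (n - 1) 1).foldl (fun pr k =>
            pr * (PySem.Dict.mk T).getD [PySem.List.pyGetD perm k 0, PySem.List.pyGetD perm (k + 1) 0] 0) 1
          if prod ≠ 0 then
            match PySem.List.index? perm a with
            | some pos => val + (-1 : Int) ^ pos * prod
            | none => val
          else val) val perm
        = val + pvChainW T a none 0 perm := by
      intro val perm hmem
      have hperm := PySem.List.perm_of_mem_permutations hmem
      have hpnd : perm.Nodup := hperm.nodup_iff.mpr hxsnd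
      have hplen : perm.length = n.toNat := by rw [hperm.length_eq, hxslen]
      have hpne : perm ≠ [] := by
        intro h; rw [h] at hplen; simp at hplen; omega
      have hamem : a ∈ perm := hperm.mem_iff.mpr (PySem.List.mem_pyRange_one.mpr ⟨ha0, han⟩)
      obtain ⟨pos, hpos⟩ : ∃ pos, PySem.List.index? perm a = some pos := by
        have := (PySem.List.index?_isSome_iff perm a).mpr hamem
        exact Option.isSome_iff_exists.mp this
      have hprod : (PySem.List.pyRange 0 (n - 1) 1).foldl (fun pr k =>
          pr * (PySem.Dict.mk T).getD [PySem.List.pyGetD perm k 0,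
            PySem.List.pyGetD perm (k + 1) 0] 0) 1 = pvChainC T none perm :=
        pvProdLoop T perm (n - 1) hpne (by omega)
      simp only [hprod, hpos]
      have hW : pvChainW T a none 0 perm = (-1 : Int) ^ pos * pvChainC T none perm := by
        rw [pvChainW_eq T a perm none 0 pos hpnd hpos]; norm_num
      rw [hW]
      split_ifs with h
      · rfl
      · rw [not_not] at h
        rw [h, mul_zero, add_zero]
    rw [PySem.List.foldl_congr_mem _ _ _ _ hbody, PySem.List.foldl_add, zero_add]
    rw [pvGoSum T a (PySem.List.pyRange 0 n 1).length (PySem.List.pyRange 0 n 1) none 0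
      le_rfl hxsnd]
  · -- a != b branch
    rw [compute_M_entry, compute_M_entry_alt, if_neg hab, if_neg hab]
    apply PySem.List.foldl_congr_mem
    intro val mask _
    dsimp only
    have hU : ((PySem.List.pyRange 0 n 1).filter (fun v => v != a && v != b)).Nodup :=
      (PySem.List.nodup_pyRange_one 0 n).filter _
    have haU : a ∉ (PySem.List.pyRange 0 n 1).filter (fun v => v != a && v != b) := by
      intro h
      have := (List.mem_filter.mp h).2
      simp at this
    have hbU : b ∉ (PySem.List.pyRange 0 n 1).filter (fun v => v != a && v != b) := by
      intro h
      have := (List.mem_filter.mp h).2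
      simp at this
    set U := (PySem.List.pyRange 0 n 1).filter (fun v => v != a && v != b) with hUdef
    rw [pvEa_eq T a _ (pvSel_nodup U hU _) (fun h => haU (pvSel_mem U _ a h)),
      pvBb_eq T b _ (pvSel_nodup U hU _) (fun h => hbU (pvSel_mem U _ b h))]
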